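-- pv_equiv track=rewrite | github.com/Wayzer2318/holbertonschool-higher_level_programming | python-data_structures/7-add_tuple.py | add_tupple
-- ===== SOURCE A (Python) =====
-- def add_tupple(tuple_a=(), tuple_b=()):
--     lista = list(tuple_a)
--     listb = list(tuple_b)
--     i = 0
--     for i in range(len(lista)):
--         i += 1
--     if i > 2:
--         lista[2:] = []
--     if i == 1:
--         lista += [0]
--     if i == 0:
--         lista += [0, 0]
--
--     j = 0
--     for j in range(0, len(listb)):
--         j += 1
--     if j > 2:
--         listb[2:] = []
--     if j == 1:
--         listb += [0]
--     if j == 0: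
--         listb += [0, 0]
--
--     z = zip(lista, listb)
--     sum = [x + y for (x, y) in z]
--     sum = tuple(sum)
--     return sum
-- ===== SOURCE B (Python) =====
-- def add_tupple(tuple_a=(), tuple_b=()):
--     a0 = tuple_a[0] if len(tuple_a) > 0 else 0
--     a1 = tuple_a[1] if len(tuple_a) > 1 else 0
--     b0 = tuple_b[0] if len(tuple_b) > 0 else 0
--     b1 = tuple_b[1] if len(tuple_b) > 1 else 0
--     return (a0 + b0, a1 + b1)
-- ===== Notes on version B (the rewrite author's own statement) =====
-- stated objective: faster
-- what changed: Replaces the loop-counted length, slice truncation/zero-padding of both lists and the zip comprehension with four guarded index reads and two additions returning the pair directly.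
import Mathlib
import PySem

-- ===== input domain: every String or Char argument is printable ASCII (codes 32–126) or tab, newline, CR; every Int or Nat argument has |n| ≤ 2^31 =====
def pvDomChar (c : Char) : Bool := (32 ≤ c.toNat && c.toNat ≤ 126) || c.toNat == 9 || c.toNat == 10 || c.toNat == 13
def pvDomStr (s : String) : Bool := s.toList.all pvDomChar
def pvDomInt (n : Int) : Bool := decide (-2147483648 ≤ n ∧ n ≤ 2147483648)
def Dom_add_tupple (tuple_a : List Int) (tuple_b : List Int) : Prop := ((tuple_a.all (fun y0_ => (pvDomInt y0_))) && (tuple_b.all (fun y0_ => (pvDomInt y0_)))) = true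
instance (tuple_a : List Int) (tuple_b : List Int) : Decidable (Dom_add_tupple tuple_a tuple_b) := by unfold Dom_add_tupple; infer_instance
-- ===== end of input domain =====

-- B replaces A's loop-counted lengths, slice truncation/zero-padding and zip comprehension
-- with four guarded index reads and two additions; proved equal on all inputs.

-- ===== PORT A =====
-- literal transliteration of A: 'for i in range(len(lista)): i += 1' leaves i as the fold below;
-- 'lista[2:] = []' is List.take 2; 'tuple(sum)' of the (always length-2) sum list is read off as a pair
def add_tupple (tuple_a : List Int) (tuple_b : List Int) : Int × Int :=
  let lista := tuple_a
  let listb := tuple_b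
  let i : Int := (PySem.List.pyRange 0 (lista.length) 1).foldl (fun _ k => k + 1) 0
  let lista := if i > 2 then lista.take 2 else lista
  let lista := if i == 1 then lista ++ [0] else lista
  let lista := if i == 0 then lista ++ [0, 0] else lista
  let j : Int := (PySem.List.pyRange 0 (listb.length) 1).foldl (fun _ k => k + 1) 0
  let listb := if j > 2 then listb.take 2 else listb
  let listb := if j == 1 then listb ++ [0] else listb
  let listb := if j == 0 then listb ++ [0, 0] else listb
  let sum := (lista.zip listb).map (fun (p : Int × Int) => p.1 + p.2)
  match sum with
  | [x, y] => (x, y)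
  | _ => (0, 0)

-- ===== PORT B =====
def add_tupple_alt (tuple_a : List Int) (tuple_b : List Int) : Int × Int :=
  let a0 := if tuple_a.length > 0 then tuple_a.headI else 0
  let a1 := if tuple_a.length > 1 then tuple_a.tail.headI else 0
  let b0 := if tuple_b.length > 0 then tuple_b.headI else 0
  let b1 := if tuple_b.length > 1 then tuple_b.tail.headI else 0
  (a0 + b0, a1 + b1)

-- ===== PRECONDITION & SPEC =====
def Spec_add_tupple (tuple_a : List Int) (tuple_b : List Int) (out : Int × Int) : Prop := out = add_tupple_alt tuple_a tuple_b
instance (tuple_a : List Int) (tuple_b : List Int) (out : Int × Int) : Decidable (Spec_add_tupple tuple_a tuple_b out) := by unfold Spec_add_tupple; infer_instance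

-- ===== CLAIM (what is proved, stated in full; the proofs are below) =====
def Claim_equal_add_tupple : Prop := ∀ (tuple_a : List Int) (tuple_b : List Int), Dom_add_tupple tuple_a tuple_b → Spec_add_tupple tuple_a tuple_b (add_tupple tuple_a tuple_b)

-- ===== LEMMAS AND PROOFS =====
-- the for-loop 'for i in range(n): i += 1' leaves i = n
theorem pyRange_count_nat (m : Nat) :
    (PySem.List.pyRange 0 (m : Int) 1).foldl (fun _ k => k + 1) (0 : Int) = (m : Int) := by
  induction m with
  | zero => rfl
  | succ p ih =>
    rw [show ((p + 1 : Nat) : Int) = (p : Int) + 1 by push_cast; ring,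
        PySem.List.pyRange_one_succ_right (by positivity), List.foldl_append]
    simp

-- ===== VERDICT (by name: the statement is the Claim_ definition above) =====
theorem add_tupple_spec : Claim_equal_add_tupple := by
  intro ta tb _
  show add_tupple ta tb = add_tupple_alt ta tb
  match ta, tb with
  | [], [] =>
    simp only [add_tupple, add_tupple_alt, List.length_cons, List.length_nil]
    simp [PySem.List.pyRange_one,
          List.range_succ]
  | [], [b0] =>
    simp only [add_tupple, add_tupple_alt, List.length_cons, List.length_nil]
    simp [PySem.List.pyRange_one,
          List.range_succ]
  | [], [b0, b1] =>
    simp only [add_tupple, add_tupple_alt, List.length_cons, List.length_nil]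
    simp [PySem.List.pyRange_one,
          List.range_succ]
  | [], b0 :: b1 :: b2 :: bs =>
    have hb := pyRange_count_nat (bs.length + 1 + 1 + 1)
    simp only [add_tupple, add_tupple_alt, List.length_cons, List.length_nil]
    simp only [hb]
    simp [PySem.List.pyRange_one,
          List.range_succ,
          show ¬(((bs.length:Int) + 1 + 1 + 1) = 0) from by omega,
          show ¬(((bs.length:Int) + 1 + 1 + 1) = 1) from by omega,
          show ¬(((bs.length:Int) + 1 + 1) = 0) from by omega,
          show (2:Int) ≤ ((bs.length:Int) + 1 + 1) from by omega]
  | [a0], [] =>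
    simp only [add_tupple, add_tupple_alt, List.length_cons, List.length_nil]
    simp [PySem.List.pyRange_one,
          List.range_succ]
  | [a0], [b0] =>
    simp only [add_tupple, add_tupple_alt, List.length_cons, List.length_nil]
    simp [PySem.List.pyRange_one,
          List.range_succ]
  | [a0], [b0, b1] =>
    simp only [add_tupple, add_tupple_alt, List.length_cons, List.length_nil]
    simp [PySem.List.pyRange_one,
          List.range_succ]
  | [a0], b0 :: b1 :: b2 :: bs =>
    have hb := pyRange_count_nat (bs.length + 1 + 1 + 1)
    simp only [add_tupple, add_tupple_alt, List.length_cons, List.length_nil]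
    simp only [hb]
    simp [PySem.List.pyRange_one,
          List.range_succ,
          show ¬(((bs.length:Int) + 1 + 1 + 1) = 0) from by omega,
          show ¬(((bs.length:Int) + 1 + 1 + 1) = 1) from by omega,
          show ¬(((bs.length:Int) + 1 + 1) = 0) from by omega,
          show (2:Int) ≤ ((bs.length:Int) + 1 + 1) from by omega]
  | [a0, a1], [] =>
    simp only [add_tupple, add_tupple_alt, List.length_cons, List.length_nil]
    simp [PySem.List.pyRange_one,
          List.range_succ]
  | [a0, a1], [b0] =>
    simp only [add_tupple, add_tupple_alt, List.length_cons, List.length_nil]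
    simp [PySem.List.pyRange_one,
          List.range_succ]
  | [a0, a1], [b0, b1] =>
    simp only [add_tupple, add_tupple_alt, List.length_cons, List.length_nil]
    simp [PySem.List.pyRange_one,
          List.range_succ]
  | [a0, a1], b0 :: b1 :: b2 :: bs =>
    have hb := pyRange_count_nat (bs.length + 1 + 1 + 1)
    simp only [add_tupple, add_tupple_alt, List.length_cons, List.length_nil]
    simp only [hb]
    simp [PySem.List.pyRange_one,
          List.range_succ,
          show ¬(((bs.length:Int) + 1 + 1 + 1) = 0) from by omega,
          show ¬(((bs.length:Int) + 1 + 1 + 1) = 1) from by omega,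
          show ¬(((bs.length:Int) + 1 + 1) = 0) from by omega,
          show (2:Int) ≤ ((bs.length:Int) + 1 + 1) from by omega]
  | a0 :: a1 :: a2 :: as, [] =>
    have ha := pyRange_count_nat (as.length + 1 + 1 + 1)
    simp only [add_tupple, add_tupple_alt, List.length_cons, List.length_nil]
    simp only [ha]
    simp [PySem.List.pyRange_one,
          List.range_succ,
          show ¬(((as.length:Int) + 1 + 1 + 1) = 0) from by omega,
          show ¬(((as.length:Int) + 1 + 1 + 1) = 1) from by omega,
          show ¬(((as.length:Int) + 1 + 1) = 0) from by omega,
          show (2:Int) ≤ ((as.length:Int) + 1 + 1) from by omega]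
  | a0 :: a1 :: a2 :: as, [b0] =>
    have ha := pyRange_count_nat (as.length + 1 + 1 + 1)
    simp only [add_tupple, add_tupple_alt, List.length_cons, List.length_nil]
    simp only [ha]
    simp [PySem.List.pyRange_one,
          List.range_succ,
          show ¬(((as.length:Int) + 1 + 1 + 1) = 0) from by omega,
          show ¬(((as.length:Int) + 1 + 1 + 1) = 1) from by omega,
          show ¬(((as.length:Int) + 1 + 1) = 0) from by omega,
          show (2:Int) ≤ ((as.length:Int) + 1 + 1) from by omega]
  | a0 :: a1 :: a2 :: as, [b0, b1] =>
    have ha := pyRange_count_nat (as.length + 1 + 1 + 1)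
    simp only [add_tupple, add_tupple_alt, List.length_cons, List.length_nil]
    simp only [ha]
    simp [PySem.List.pyRange_one,
          List.range_succ,
          show ¬(((as.length:Int) + 1 + 1 + 1) = 0) from by omega,
          show ¬(((as.length:Int) + 1 + 1 + 1) = 1) from by omega,
          show ¬(((as.length:Int) + 1 + 1) = 0) from by omega,
          show (2:Int) ≤ ((as.length:Int) + 1 + 1) from by omega]
  | a0 :: a1 :: a2 :: as, b0 :: b1 :: b2 :: bs =>
    have ha := pyRange_count_nat (as.length + 1 + 1 + 1)
    have hb := pyRange_count_nat (bs.length + 1 + 1 + 1)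
    simp only [add_tupple, add_tupple_alt, List.length_cons, List.length_nil]
    simp only [ha, hb]
    simp [PySem.List.pyRange_one,
          List.range_succ,
          show ¬(((as.length:Int) + 1 + 1 + 1) = 0) from by omega,
          show ¬(((as.length:Int) + 1 + 1 + 1) = 1) from by omega,
          show ¬(((as.length:Int) + 1 + 1) = 0) from by omega,
          show (2:Int) ≤ ((as.length:Int) + 1 + 1) from by omega,
          show ¬(((bs.length:Int) + 1 + 1 + 1) = 0) from by omega,
          show ¬(((bs.length:Int) + 1 + 1 + 1) = 1) from by omega,
          show ¬(((bs.length:Int) + 1 + 1) = 0) from by omega,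
          show (2:Int) ≤ ((bs.length:Int) + 1 + 1) from by omega]
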